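-- pv_equiv track=rewrite | github.com/forgiare/accendino | src/accendino/utils.py | escapeForPowershell
-- ===== SOURCE A (Python) =====
-- def escapeForPowershell(s):
--     ret = ''
--     haveSpace = False
--
--     for c in s:
--         if c == '\\':
--             c = '\\\\'
--         elif c == ' ':
--             haveSpace = True
--
--         ret += c
--
--     if haveSpace:
--         return  "'" + ret + "'"
--
--     return ret
-- ===== SOURCE B (Python) =====
-- def escapeForPowershell(s):
--     escaped = s.replace('\\', '\\\\')
--     if ' ' in s:
--         return "'" + escaped + "'"
--     return escaped
-- ===== Notes on version B (the rewrite author's own statement) =====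
-- stated objective: idiomatic
-- what changed: Replaces A's fused per-character loop (which simultaneously doubles backslashes and flags spaces) with two independent whole-string library passes: str.replace for escaping and a substring membership test for the space check.
import Mathlib
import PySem

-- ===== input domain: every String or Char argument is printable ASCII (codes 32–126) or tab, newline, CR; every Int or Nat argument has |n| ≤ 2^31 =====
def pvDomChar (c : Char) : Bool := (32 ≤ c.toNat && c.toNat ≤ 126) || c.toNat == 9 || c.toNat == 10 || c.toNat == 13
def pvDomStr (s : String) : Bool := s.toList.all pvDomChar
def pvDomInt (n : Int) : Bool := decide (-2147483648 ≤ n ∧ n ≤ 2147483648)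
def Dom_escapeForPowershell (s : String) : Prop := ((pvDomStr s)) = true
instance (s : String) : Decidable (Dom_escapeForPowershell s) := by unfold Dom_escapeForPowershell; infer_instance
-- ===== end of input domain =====

-- B replaces A's fused per-character loop with two whole-string library passes
-- (str.replace for escaping, substring membership for the space test).

-- ===== PORT A =====
-- A: one loop over the characters, accumulating the escaped string and a space flag.
def escapeForPowershell (s : String) : String :=
  let st := s.toList.foldl
    (fun (acc : List Char × Bool) c =>
      if c = '\\' then (acc.1 ++ ['\\', '\\'], acc.2)
      else if c = ' ' then (acc.1 ++ [c], true)
      else (acc.1 ++ [c], acc.2))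
    ([], false)
  if st.2 then String.ofList ('\'' :: st.1 ++ ['\'']) else String.ofList st.1

-- ===== PORT B =====
-- B: escaped = s.replace('\\','\\\\'); quote iff ' ' in s.
def escapeForPowershell_alt (s : String) : String :=
  let escaped := PySem.Str.replace s "\\" "\\\\"
  if PySem.Str.isIn " " s then String.ofList ('\'' :: escaped.toList ++ ['\'']) else escaped

-- ===== PRECONDITION & SPEC =====
def Spec_escapeForPowershell (s : String) (out : String) : Prop := out = escapeForPowershell_alt s
instance (s : String) (out : String) : Decidable (Spec_escapeForPowershell s out) := by unfold Spec_escapeForPowershell; infer_instance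

-- ===== CLAIM (what is proved, stated in full; the proofs are below) =====
def Claim_equal_escapeForPowershell : Prop := ∀ (s : String), Dom_escapeForPowershell s → Spec_escapeForPowershell s (escapeForPowershell s)

-- ===== LEMMAS AND PROOFS =====

/-- The escaping done per character by both programs. -/
def pvEsc (c : Char) : List Char := if c = '\\' then ['\\', '\\'] else [c]

theorem replace_go_single (o : Char) (new : List Char) (l acc : List Char)
    (fuel : Nat) (h : l.length ≤ fuel) :
    PySem.Chars.replace.go [o] new fuel l acc
      = acc.reverse ++ l.flatMap (fun c => if c = o then new else [c]) := by
  induction l generalizing fuel acc with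
  | nil =>
    cases fuel <;> simp [PySem.Chars.replace.go]
  | cons c t ih =>
    cases fuel with
    | zero => simp at h
    | succ n =>
      simp only [PySem.Chars.replace.go]
      by_cases hc : c = o
      · subst hc
        have hp : List.isPrefixOf [c] (c :: t) = true := by
          simp [List.isPrefixOf]
        simp only [hp, if_pos]
        have hd : List.drop (List.length [c]) (c :: t) = t := by simp
        rw [hd, ih (new.reverse ++ acc) n (by simpa using Nat.le_of_succ_le_succ h)]
        simp
      · have hp : List.isPrefixOf [o] (c :: t) = false := by
          simp [List.isPrefixOf]
          intro h'; exact absurd h'.symm hc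
        rw [if_neg (by simp [hp])]
        rw [ih (c :: acc) n (by simpa using Nat.le_of_succ_le_succ h)]
        simp [hc]

theorem replace_single (l : List Char) :
    PySem.Chars.replace l ['\\'] ['\\', '\\'] = l.flatMap pvEsc := by
  rw [PySem.Chars.replace]
  rw [if_neg (by simp)]
  rw [replace_go_single _ _ _ _ _ (le_refl _)]
  simp only [List.reverse_nil, List.nil_append]
  rfl

theorem foldl_esc (l : List Char) (acc : List Char) (b : Bool) :
    l.foldl
      (fun (acc : List Char × Bool) c =>
        if c = '\\' then (acc.1 ++ ['\\', '\\'], acc.2)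
        else if c = ' ' then (acc.1 ++ [c], true)
        else (acc.1 ++ [c], acc.2))
      (acc, b)
    = (acc ++ l.flatMap pvEsc, b || l.any (· = ' ')) := by
  induction l generalizing acc b with
  | nil => simp
  | cons c t ih =>
    by_cases hc : c = '\\'
    · subst hc
      simp only [List.foldl_cons, ih]
      simp [pvEsc]
    · by_cases hs : c = ' '
      · subst hs
        simp only [List.foldl_cons, if_neg hc, ih]
        simp [pvEsc, hc]
      · simp only [List.foldl_cons, if_neg hc, if_neg hs, ih]
        simp [pvEsc, hc, hs]

theorem isIn_space (s : String) :
    PySem.Str.isIn " " s = s.toList.any (· = ' ') := by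
  rw [Bool.eq_iff_iff, PySem.Str.isIn_iff_infix, List.any_eq_true]
  constructor
  · intro h
    exact ⟨' ', h.mem (by simp), by simp⟩
  · rintro ⟨x, hx, hxeq⟩
    have : x = ' ' := by simpa using hxeq
    subst this
    obtain ⟨u, v, huv⟩ := List.append_of_mem hx
    rw [huv]
    exact ⟨u, v, by simp⟩

-- ===== VERDICT (by name: the statement is the Claim_ definition above) =====
theorem escapeForPowershell_spec : Claim_equal_escapeForPowershell := by
  intro s _
  unfold Spec_escapeForPowershell escapeForPowershell escapeForPowershell_alt
  have hesc : (PySem.Str.replace s "\\" "\\\\").toList = s.toList.flatMap pvEsc := by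
    rw [PySem.Str.toList_replace]
    have h1 : ("\\" : String).toList = ['\\'] := rfl
    have h2 : ("\\\\" : String).toList = ['\\', '\\'] := rfl
    rw [h1, h2, replace_single]
  rw [foldl_esc, isIn_space]
  by_cases h : s.toList.any (· = ' ')
  · rw [if_pos (by simp [h]), if_pos h]
    rw [← hesc]
    simp
  · rw [if_neg (by simp [h]), if_neg (by simp [h])]
    calc String.ofList (List.flatMap pvEsc s.toList)
        = String.ofList (PySem.Str.replace s "\\" "\\\\").toList := by rw [hesc]
      _ = PySem.Str.replace s "\\" "\\\\" := String.ofList_toList
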